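-- pv_equiv track=rewrite | github.com/miliar/Code_Jam_Webscraper | solutions_python/Problem_201/240.py | last_stall_bisect
-- ===== SOURCE A (Python) =====
-- def last_stall_bisect(n, k):
--     lo, hi = 0, n+1
--     while k > 1:
--         mid = lo + hi >> 1
--         k -= 1
--         if k % 2 == 0:
--             hi = mid
--             k //= 2
--         else:
--             lo = mid
--             k = k//2 + 1
--     mid = lo + hi >> 1
--     ls, rs = mid - lo - 1, hi - mid - 1
--     return f"{max(ls, rs)} {min(ls, rs)}"
-- ===== SOURCE B (Python) =====
-- def last_stall_bisect(n, k):
--     # Closed form: person k (k>=1) splits a level-j gap, j = bit_length(k)-1;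
--     # gaps at level j have size (n+1)//2^j or that +1, the larger ones going
--     # to the first (n+1) % 2^j people of the level.  k <= 1 never enters A's loop.
--     if k < 1:
--         L = n + 1
--     else:
--         j = k.bit_length() - 1
--         p = 1 << j
--         q, r = divmod(n + 1, p)
--         L = q + 1 if k - p < r else q
--     return f"{(L + 1) // 2 - 1} {L // 2 - 1}"
-- ===== Notes on version B (the rewrite author's own statement) =====
-- stated objective: simpler
-- what changed: Replaced A's bit-by-bit bisection loop (which walks lo/hi down the binary tree of k) with a closed form: person k splits a level-j gap (j = k.bit_length()-1) whose size is (n+1)//2**j, plus 1 for the first (n+1) % 2**j people of the level.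
import Mathlib
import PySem

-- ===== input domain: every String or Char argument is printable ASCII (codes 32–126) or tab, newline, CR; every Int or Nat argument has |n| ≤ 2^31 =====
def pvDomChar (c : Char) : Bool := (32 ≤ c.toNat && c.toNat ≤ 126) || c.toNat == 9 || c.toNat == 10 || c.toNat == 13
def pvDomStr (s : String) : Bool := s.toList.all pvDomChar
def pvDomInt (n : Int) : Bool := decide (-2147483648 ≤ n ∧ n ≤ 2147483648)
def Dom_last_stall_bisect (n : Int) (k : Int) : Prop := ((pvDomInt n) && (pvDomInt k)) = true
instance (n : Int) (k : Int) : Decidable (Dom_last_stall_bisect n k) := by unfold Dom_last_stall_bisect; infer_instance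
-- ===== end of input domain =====

-- B replaces A's bit-by-bit bisection loop with a closed form for the size of the
-- gap the k-th person splits (O(1) arithmetic from k.bit_length()); objective: simpler.

-- ===== PORT A =====
-- A's while-loop as structural recursion on k (k strictly decreases while 1 < k).
-- Python `lo + hi >> 1` is arithmetic shift = floor division by 2, `k //= 2` is floor division.
def lastStallLoop (lo hi k : Int) : Int × Int :=
  if h : 1 < k then
    let mid := PySem.Int.floordiv (lo + hi) 2
    let k' := k - 1
    if PySem.Int.mod k' 2 = 0 then
      lastStallLoop lo mid (PySem.Int.floordiv k' 2)
    else
      lastStallLoop mid hi (PySem.Int.floordiv k' 2 + 1)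
  else (lo, hi)
termination_by k.toNat
decreasing_by
  · rw [PySem.Int.floordiv_eq_ediv_of_pos (by norm_num : (0:Int) < 2)]; omega
  · rw [PySem.Int.floordiv_eq_ediv_of_pos (by norm_num : (0:Int) < 2)]; omega

def last_stall_bisect (n : Int) (k : Int) : String :=
  let p := lastStallLoop 0 (n + 1) k
  let lo := p.1
  let hi := p.2
  let mid := PySem.Int.floordiv (lo + hi) 2
  let ls := mid - lo - 1
  let rs := hi - mid - 1
  PySem.Int.toStr (max ls rs) ++ " " ++ PySem.Int.toStr (min ls rs)

-- ===== PORT B =====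
-- Transliteration of Source B: closed form.  `k.bit_length()` → PySem.Int.bitLength,
-- `divmod(n+1, p)` → floordiv/mod, f-string → PySem.Int.toStr.
def last_stall_bisect_alt (n : Int) (k : Int) : String :=
  let L : Int :=
    if k < 1 then n + 1
    else
      let j := PySem.Int.bitLength k - 1
      let p : Int := 2 ^ j
      let q := PySem.Int.floordiv (n + 1) p
      let r := PySem.Int.mod (n + 1) p
      if k - p < r then q + 1 else q
  PySem.Int.toStr (PySem.Int.floordiv (L + 1) 2 - 1) ++ " " ++
    PySem.Int.toStr (PySem.Int.floordiv L 2 - 1)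

-- ===== PRECONDITION & SPEC =====
def Spec_last_stall_bisect (n : Int) (k : Int) (out : String) : Prop := out = last_stall_bisect_alt n k
instance (n : Int) (k : Int) (out : String) : Decidable (Spec_last_stall_bisect n k out) := by unfold Spec_last_stall_bisect; infer_instance

-- ===== CLAIM (what is proved, stated in full; the proofs are below) =====
def Claim_equal_last_stall_bisect : Prop := ∀ (n : Int) (k : Int), Dom_last_stall_bisect n k → Spec_last_stall_bisect n k (last_stall_bisect n k)

-- ===== LEMMAS AND PROOFS =====

-- Length of the final interval of A's loop, as a recursion on (L, k) alone.
def flen (L k : Int) : Int :=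
  if h : 1 < k then
    if (k - 1) % 2 = 0 then flen (L / 2) ((k - 1) / 2)
    else flen (L - L / 2) ((k - 1) / 2 + 1)
  else L
termination_by k.toNat
decreasing_by all_goals omega

-- A's loop preserves only the interval length, and it evolves as flen.
theorem loop_sub : ∀ (kn : Nat) (k lo hi : Int), k.toNat = kn →
    (lastStallLoop lo hi k).2 - (lastStallLoop lo hi k).1 = flen (hi - lo) k := by
  intro kn
  induction kn using Nat.strong_induction_on with
  | _ kn ih =>
    intro k lo hi hkn
    rw [lastStallLoop, flen]
    by_cases h : 1 < k
    · simp only [h, dif_pos,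
        PySem.Int.floordiv_eq_ediv_of_pos (by norm_num : (0:Int) < 2),
        PySem.Int.mod_eq_emod_of_pos (by norm_num : (0:Int) < 2)]
      by_cases hpar : (k - 1) % 2 = 0
      · simp only [hpar, if_pos]
        rw [ih ((k-1)/2).toNat (by omega) _ _ _ rfl]
        congr 1; omega
      · simp only [hpar, if_false]
        rw [ih ((k-1)/2 + 1).toNat (by omega) _ _ _ rfl]
        congr 1; omega
    · simp [h]

-- division/remainder uniqueness for a positive divisor
theorem edivmod_unique (P q' r' x : Int) (hP : 0 < P) (hx : x = P * q' + r')
    (h0 : 0 ≤ r') (h1 : r' < P) : x / P = q' ∧ x % P = r' := by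
  constructor
  · rw [hx, add_comm, Int.add_mul_ediv_left _ _ (by omega : P ≠ 0),
      Int.ediv_eq_zero_of_lt h0 h1, zero_add]
  · rw [hx, add_comm, Int.add_mul_emod_self_left, Int.emod_eq_of_lt h0 h1]

-- bounds from bitLength: for 1 ≤ k, 2^(bitLength k - 1) ≤ k < 2^(bitLength k)
theorem bitLength_bounds (k : Int) (hk : 1 ≤ k) :
    (2:Int) ^ (PySem.Int.bitLength k - 1) ≤ k ∧ k < 2 ^ (PySem.Int.bitLength k) ∧
    1 ≤ PySem.Int.bitLength k := by
  have h1 := PySem.Int.two_pow_bitLength_le k (by omega)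
  have h2 := PySem.Int.lt_two_pow_bitLength k
  have hna : (k.natAbs : Int) = k := Int.natAbs_of_nonneg (by omega)
  have hb1 : 1 ≤ PySem.Int.bitLength k := by
    by_contra hc
    have : PySem.Int.bitLength k = 0 := by omega
    rw [this] at h2; simp at h2; omega
  refine ⟨?_, ?_, hb1⟩
  · calc ((2:Int) ^ (PySem.Int.bitLength k - 1)) = ((2 ^ (PySem.Int.bitLength k - 1) : Nat) : Int) := by push_cast; ring
      _ ≤ (k.natAbs : Int) := by exact_mod_cast h1
      _ = k := hna
  · calc k = (k.natAbs : Int) := hna.symm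
      _ < ((2 ^ (PySem.Int.bitLength k) : Nat) : Int) := by exact_mod_cast h2
      _ = 2 ^ (PySem.Int.bitLength k) := by push_cast; ring

-- Core closed form: flen L k is the floor or ceiling level-j quotient, j = bitLength k - 1.
theorem flen_closed : ∀ (kn : Nat) (k : Int), k.toNat = kn → 1 ≤ k → ∀ L : Int,
    flen L k =
      (if k - 2 ^ (PySem.Int.bitLength k - 1) < L % 2 ^ (PySem.Int.bitLength k - 1)
       then L / 2 ^ (PySem.Int.bitLength k - 1) + 1
       else L / 2 ^ (PySem.Int.bitLength k - 1)) := by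
  intro kn
  induction kn using Nat.strong_induction_on with
  | _ kn ih =>
    intro k hkn hk L
    by_cases h : 1 < k
    · -- k ≥ 2; both branches recurse on k₂ = k / 2 with bitLength one smaller
      have hk2 : (1:Int) ≤ k / 2 := by omega
      have hbl : PySem.Int.bitLength k = PySem.Int.bitLength (k / 2) + 1 := by
        rw [PySem.Int.bitLength_of_pos (by omega : (0:Int) < k),
          PySem.Int.floordiv_eq_ediv_of_pos (by norm_num : (0:Int) < 2)]
      obtain ⟨hlow2, hhigh2, hb12⟩ := bitLength_bounds (k / 2) hk2
      set j2 : Nat := PySem.Int.bitLength (k / 2) - 1 with hj2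
      set P : Int := 2 ^ j2 with hP
      have hPpos : (0:Int) < P := by positivity
      have hbig : (2:Int) ^ (PySem.Int.bitLength k - 1) = 2 * P := by
        rw [hbl]
        have : PySem.Int.bitLength (k / 2) + 1 - 1 = j2 + 1 := by omega
        rw [this, pow_succ]; ring
      have hhigh2' : k / 2 < 2 * P := by
        have : (2:Int) ^ (PySem.Int.bitLength (k/2)) = 2 * P := by
          have : PySem.Int.bitLength (k/2) = j2 + 1 := by omega
          rw [this, pow_succ]; ring
        omega
      -- decompose L by 2P
      have hLdm := Int.mul_ediv_add_emod L (2 * P)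
      set q : Int := L / (2 * P) with hq
      set r : Int := L % (2 * P) with hr
      have hr0 : 0 ≤ r := Int.emod_nonneg L (by omega)
      have hr1 : r < 2 * P := Int.emod_lt_of_pos L (by omega)
      have hL : L = 2 * P * q + r := by omega
      have hL2 : L = P * q + P * q + r := by rw [hL]; ring
      have hhalf : L / 2 = P * q + r / 2 := by
        rw [hL]
        have : 2 * P * q + r = r + (P * q) * 2 := by ring
        rw [this, Int.add_mul_ediv_right _ _ (by norm_num : (2:Int) ≠ 0)]; ring
      have hlowP : P ≤ k / 2 := by rw [hP, hj2]; exact hlow2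
      rw [flen]
      simp only [h, dif_pos]
      rw [hbig]
      by_cases hpar : (k - 1) % 2 = 0
      · -- k odd: recurse on (L/2, (k-1)/2), (k-1)/2 = k/2
        have hkodd : k % 2 = 1 := by omega
        have hk2eq : (k - 1) / 2 = k / 2 := by omega
        simp only [hpar, if_pos]
        rw [hk2eq, ih (k/2).toNat (by omega) _ rfl hk2 (L/2), ← hj2, ← hP]
        -- (L/2) / P = q, (L/2) % P = r/2
        have hrd : 0 ≤ r / 2 ∧ r / 2 < P := by omega
        obtain ⟨hdq, hdr⟩ := edivmod_unique P q (r / 2) (L / 2) hPpos hhalf hrd.1 hrd.2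
        rw [hdq, hdr]
        -- i = k - 2P odd; i/2 = k/2 - P
        have hieq : k / 2 - P = (k - 2 * P) / 2 := by omega
        split_ifs with c1 c2 c2 <;> omega
      · -- k even: recurse on (L - L/2, (k-1)/2 + 1) = (ceil(L/2), k/2)
        have hkeven : k % 2 = 0 := by omega
        have hk2eq : (k - 1) / 2 + 1 = k / 2 := by omega
        simp only [hpar, if_false]
        rw [hk2eq, ih (k/2).toNat (by omega) _ rfl hk2 (L - L/2), ← hj2, ← hP]
        have hceil : L - L / 2 = P * q + (r - r / 2) := by omega
        by_cases hrtop : r = 2 * P - 1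
        · -- ceil(r/2) = P: quotient rolls over to q+1
          have hceil' : L - L / 2 = P * (q + 1) + 0 := by
            have hx : P * (q + 1) = P * q + P := by ring
            rw [hceil]; omega
          obtain ⟨hdq, hdr⟩ :=
            edivmod_unique P (q + 1) 0 (L - L / 2) hPpos hceil' (le_refl 0) hPpos
          have hPq : P * (q + 1) = P * q + P := by ring
          rw [hdq, hdr]
          split_ifs with c1 c2 c2 <;> omega
        · have hrd : 0 ≤ r - r / 2 ∧ r - r / 2 < P := by omega
          obtain ⟨hdq, hdr⟩ :=
            edivmod_unique P q (r - r / 2) (L - L / 2) hPpos hceil hrd.1 hrd.2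
          rw [hdq, hdr]
          split_ifs with c1 c2 c2 <;> omega
    · -- k = 1: j = 0, P = 1
      have hk1 : k = 1 := by omega
      subst hk1
      rw [flen]
      norm_num
      have : PySem.Int.bitLength (1:Int) = 1 := by decide
      rw [this]
      norm_num

-- ===== VERDICT (by name: the statement is the Claim_ definition above) =====
theorem last_stall_bisect_spec : Claim_equal_last_stall_bisect := by
  unfold Claim_equal_last_stall_bisect Spec_last_stall_bisect
  intro n k _
  unfold last_stall_bisect last_stall_bisect_alt
  simp only [PySem.Int.floordiv_eq_ediv_of_pos (by norm_num : (0:Int) < 2)]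
  have hsub := loop_sub k.toNat k 0 (n + 1) rfl
  rw [show (n : Int) + 1 - 0 = n + 1 from by ring] at hsub
  set lo := (lastStallLoop 0 (n + 1) k).1 with hlo
  set hi := (lastStallLoop 0 (n + 1) k).2 with hhi
  by_cases hk : k < 1
  · -- loop body never runs and flen L k = L
    have hL : hi - lo = n + 1 := by
      rw [hsub, flen]; simp only [dif_neg (by omega : ¬ (1:Int) < k)]
    simp only [if_pos hk]
    have h1 : max ((lo + hi) / 2 - lo - 1) (hi - (lo + hi) / 2 - 1) = (n + 1 + 1) / 2 - 1 := by
      rw [max_def]; split_ifs <;> omega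
    have h2 : min ((lo + hi) / 2 - lo - 1) (hi - (lo + hi) / 2 - 1) = (n + 1) / 2 - 1 := by
      rw [min_def]; split_ifs <;> omega
    rw [h1, h2]
  · -- closed form for the final length
    have hk1 : (1:Int) ≤ k := by omega
    have hflen := flen_closed k.toNat k rfl hk1 (n + 1)
    set j : Nat := PySem.Int.bitLength k - 1 with hj
    have hPpos : (0:Int) < 2 ^ j := by positivity
    simp only [if_neg hk,
      PySem.Int.floordiv_eq_ediv_of_pos hPpos, PySem.Int.mod_eq_emod_of_pos hPpos]
    set L : Int := if k - 2 ^ j < (n + 1) % 2 ^ j then (n + 1) / 2 ^ j + 1 else (n + 1) / 2 ^ j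
      with hLdef
    have hL : hi - lo = L := by rw [hsub, hflen]
    have h1 : max ((lo + hi) / 2 - lo - 1) (hi - (lo + hi) / 2 - 1) = (L + 1) / 2 - 1 := by
      rw [max_def]; split_ifs <;> omega
    have h2 : min ((lo + hi) / 2 - lo - 1) (hi - (lo + hi) / 2 - 1) = L / 2 - 1 := by
      rw [min_def]; split_ifs <;> omega
    rw [h1, h2]
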